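-- pv_equiv track=rewrite | github.com/Redback-Operations/redback-orion | 26_T1/afl_player_tracking_and_crowd_monitoring/Crowd_Monitoring/2026_T1/heatmap/generate_average_heatmap_data.py | zone_name
-- ===== SOURCE A (Python) =====
-- def zone_name(row_index: int, col_index: int) -> str:
--     """Convert row/col index into zone names like A1, B3, AA10."""
--     letters = ""
--     n = row_index
--     while True:
--         letters = chr(ord("A") + (n % 26)) + letters
--         n = n // 26 - 1
--         if n < 0:
--             break
--     return f"{letters}{col_index + 1}"
-- ===== SOURCE B (Python) =====
-- def zone_name(row_index: int, col_index: int) -> str: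
--     """Convert row/col index into zone names like A1, B3, AA10."""
--     def letters(n: int) -> str:
--         if n < 0:
--             return ""
--         return letters(n // 26 - 1) + chr(ord("A") + n % 26)
--     return letters(row_index // 26 - 1) + chr(ord("A") + row_index % 26) + str(col_index + 1)
-- ===== Notes on version B (the rewrite author's own statement) =====
-- stated objective: alternative
-- what changed: The iterative prepend-to-accumulator do-while loop is replaced by a recursive digit helper that builds the letter string front-to-back from the quotients, with the final column suffix concatenated directly.
import Mathlib
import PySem

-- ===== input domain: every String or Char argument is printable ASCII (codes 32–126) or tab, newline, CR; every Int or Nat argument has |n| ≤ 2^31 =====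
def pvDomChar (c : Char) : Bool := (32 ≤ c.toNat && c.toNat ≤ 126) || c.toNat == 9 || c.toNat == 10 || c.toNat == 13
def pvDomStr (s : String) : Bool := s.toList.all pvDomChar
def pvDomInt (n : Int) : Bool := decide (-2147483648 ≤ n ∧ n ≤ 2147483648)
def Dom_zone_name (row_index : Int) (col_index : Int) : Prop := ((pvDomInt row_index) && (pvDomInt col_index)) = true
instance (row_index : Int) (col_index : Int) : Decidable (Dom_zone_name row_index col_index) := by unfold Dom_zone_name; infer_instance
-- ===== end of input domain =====

-- B replaces A's iterative prepend loop by a recursive digit helper building the letters front-to-back; same cost (alternative decomposition).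


-- ===== PORT A =====
-- termination helper for A's do-while loop: if the next n is still ≥ 0, it shrank
theorem pvLoopDec (n : Int) (h : ¬ PySem.Int.floordiv n 26 - 1 < 0) :
    (PySem.Int.floordiv n 26 - 1).toNat < n.toNat := by
  rw [PySem.Int.floordiv_eq_ediv_of_pos (by omega)] at h ⊢
  omega

-- the loop body: letters = chr(ord('A') + n % 26) + letters; n = n // 26 - 1; break when n < 0
def zoneLoop (letters : String) (n : Int) : String :=
  let letters' := String.ofList (Char.ofNat (65 + (PySem.Int.mod n 26).toNat) :: letters.toList)
  let n' := PySem.Int.floordiv n 26 - 1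
  if h : n' < 0 then letters'
  else zoneLoop letters' n'
termination_by n.toNat
decreasing_by exact pvLoopDec n h

def zone_name (row_index : Int) (col_index : Int) : String :=
  zoneLoop "" row_index ++ PySem.Int.toStr (col_index + 1)

-- ===== PORT B =====
-- recursive helper: letters(n) = "" if n < 0 else letters(n // 26 - 1) + chr(ord('A') + n % 26)
def zoneLetters (n : Int) : String :=
  if h : n < 0 then ""
  else zoneLetters (PySem.Int.floordiv n 26 - 1) ++ String.ofList [Char.ofNat (65 + (PySem.Int.mod n 26).toNat)]
termination_by (n + 1).toNat
decreasing_by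
  rw [PySem.Int.floordiv_eq_ediv_of_pos (by omega)]
  omega

def zone_name_alt (row_index : Int) (col_index : Int) : String :=
  zoneLetters (PySem.Int.floordiv row_index 26 - 1)
    ++ String.ofList [Char.ofNat (65 + (PySem.Int.mod row_index 26).toNat)]
    ++ PySem.Int.toStr (col_index + 1)

-- ===== PRECONDITION & SPEC =====
def Spec_zone_name (row_index : Int) (col_index : Int) (out : String) : Prop := out = zone_name_alt row_index col_index
instance (row_index : Int) (col_index : Int) (out : String) : Decidable (Spec_zone_name row_index col_index out) := by unfold Spec_zone_name; infer_instance

-- ===== CLAIM (what is proved, stated in full; the proofs are below) =====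
def Claim_equal_zone_name : Prop := ∀ (row_index : Int) (col_index : Int), Dom_zone_name row_index col_index → Spec_zone_name row_index col_index (zone_name row_index col_index)

-- ===== LEMMAS AND PROOFS =====
-- g n = the full letter block for row index n (always at least one digit)
def zoneG (n : Int) : String :=
  zoneLetters (PySem.Int.floordiv n 26 - 1) ++ String.ofList [Char.ofNat (65 + (PySem.Int.mod n 26).toNat)]

theorem zoneLoop_eq_zoneG_fuel (k : Nat) : ∀ (n : Int), n.toNat ≤ k → ∀ (acc : String), zoneLoop acc n = zoneG n ++ acc := by
  induction k with
  | zero =>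
    intro n hn acc
    rw [zoneLoop, zoneG]
    have h : PySem.Int.floordiv n 26 - 1 < 0 := by
      by_contra h
      exact absurd (pvLoopDec n h) (by omega)
    rw [dif_pos h]
    conv_rhs => rw [zoneLetters, dif_pos h]
    apply String.ext
    simp
  | succ k ih =>
    intro n hn acc
    rw [zoneLoop, zoneG]
    by_cases h : PySem.Int.floordiv n 26 - 1 < 0
    · rw [dif_pos h]
      conv_rhs => rw [zoneLetters, dif_pos h]
      apply String.ext
      simp
    · rw [dif_neg h]
      rw [ih _ (by have := pvLoopDec n h; omega)]
      conv_rhs => rw [zoneLetters, dif_neg h]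
      show zoneG _ ++ _ = _
      rw [zoneG]
      apply String.ext
      simp

theorem zoneLoop_eq_zoneG (n : Int) (acc : String) : zoneLoop acc n = zoneG n ++ acc :=
  zoneLoop_eq_zoneG_fuel n.toNat n (le_refl _) acc

-- ===== VERDICT (by name: the statement is the Claim_ definition above) =====
theorem zone_name_spec : Claim_equal_zone_name := by
  intro r c _
  show zone_name r c = zone_name_alt r c
  rw [zone_name, zone_name_alt, zoneLoop_eq_zoneG]
  show zoneG r ++ "" ++ _ = _
  rw [zoneG]
  apply String.ext
  simp
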